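-- pv_equiv track=rewrite | github.com/pypi-data/pypi-mirror-73 | packages/lex-game/lex_game-0.0.1.tar.gz/lex_game-0.0.1/lexcel/lex.py | pawns_to_code
-- ===== SOURCE A (Python) =====
-- VIOLET = 2
--
-- def pawns_to_code(pawns_dict):
--     """Return an alphanumeric representation of a board for ease board matching.
--
--     The code is a string of alphanumeric digits representing columns,
--     therefore a flipped board has exactly the reverse code.
--
--     """
--     r = ''
--     DIGITS="0123456789ABCDEFGHIJKLMNOPQ"
--     base = VIOLET+1
--     assert len(DIGITS) == base**3, len(DIGITS) # pragma: no mutate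
--     for c in sorted(pawns_dict.keys()):
--         n = 0
--         for i, p in enumerate(pawns_dict[c]):
--             n += p * base**i
--         r += DIGITS[n]
--     return r.upper()
-- ===== SOURCE B (Python) =====
-- VIOLET = 2
--
-- def pawns_to_code(pawns_dict):
--     """Return an alphanumeric representation of a board for ease board matching."""
--     DIGITS = "0123456789ABCDEFGHIJKLMNOPQ"
--     base = VIOLET + 1
--     assert len(DIGITS) == base**3, len(DIGITS)
--     # Row-major accumulation: sweep pawn positions across ALL columns at once,
--     # threading one powers accumulator, instead of converting each column alone.
--     cols = [pawns_dict[c] for c in sorted(pawns_dict)]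
--     ns = [0] * len(cols)
--     power = 1
--     for i in range(max(map(len, cols), default=0)):
--         ns = [n + (ps[i] * power if i < len(ps) else 0) for n, ps in zip(ns, cols)]
--         power *= base
--     return ''.join(DIGITS[n] for n in ns).upper()
-- ===== Notes on version B (the rewrite author's own statement) =====
-- stated objective: alternative
-- what changed: Replaces A's column-by-column conversion (inner enumerate loop summing p*base**i per column) with a row-major sweep: one outer loop over pawn positions that updates all column accumulators at once while threading a single running power, then a final join pass mapping accumulators to digits.
import Mathlib
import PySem

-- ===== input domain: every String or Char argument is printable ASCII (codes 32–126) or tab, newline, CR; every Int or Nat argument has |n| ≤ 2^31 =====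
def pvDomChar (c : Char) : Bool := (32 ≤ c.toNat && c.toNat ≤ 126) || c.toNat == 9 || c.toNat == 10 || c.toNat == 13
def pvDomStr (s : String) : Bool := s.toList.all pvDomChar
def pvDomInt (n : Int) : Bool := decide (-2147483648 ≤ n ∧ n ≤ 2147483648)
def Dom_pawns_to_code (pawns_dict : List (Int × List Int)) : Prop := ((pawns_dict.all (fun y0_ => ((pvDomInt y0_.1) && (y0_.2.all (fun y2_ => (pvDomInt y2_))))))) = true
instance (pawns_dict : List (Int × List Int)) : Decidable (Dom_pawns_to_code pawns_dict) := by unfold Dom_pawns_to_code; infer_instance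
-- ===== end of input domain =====

-- B replaces A's per-column power summation by a row-major sweep over pawn
-- positions updating all column accumulators at once (objective: alternative).

-- ===== PORT A =====
-- assert len(DIGITS) == base**3 always holds (27 = 3**3), so it is not ported.
def pawns_to_code (pawns_dict : List (Int × List Int)) : String :=
  let d := PySem.Dict.ofList pawns_dict
  let DIGITS : String := "0123456789ABCDEFGHIJKLMNOPQ"
  let base : Int := 2 + 1   -- VIOLET + 1
  let r := (PySem.List.sorted d.keys (fun x => x) false).foldl
    (fun r c =>
      let n := (PySem.List.enumerate (d.getD c [])).foldl
        (fun n ip => n + ip.2 * base ^ ip.1.toNat) 0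
      match PySem.Str.pyGet? DIGITS n with    -- none = IndexError, excluded by Pre_
      | some ch => r.push ch
      | none => r) ""
  PySem.Str.upper r

-- ===== PORT B =====
def pawns_to_code_alt (pawns_dict : List (Int × List Int)) : String :=
  let d := PySem.Dict.ofList pawns_dict
  let DIGITS : String := "0123456789ABCDEFGHIJKLMNOPQ"
  let base : Int := 2 + 1   -- VIOLET + 1
  let cols := (PySem.List.sorted d.keys (fun x => x) false).map (fun c => d.getD c [])
  let M := cols.foldr (fun ps m => max ps.length m) 0   -- max(map(len, cols), default=0)
  let st := (List.range M).foldl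
    (fun (st : List Int × Int) i =>
      (List.zipWith (fun n ps => if i < ps.length then n + ps.getD i 0 * st.2 else n) st.1 cols,
       st.2 * base))
    (List.replicate cols.length (0 : Int), 1)
  PySem.Str.upper (String.ofList
    (st.1.map (fun n => (PySem.Str.pyGet? DIGITS n).getD 'X')))  -- getD never hit under Pre_

-- ===== PRECONDITION & SPEC =====
-- Pre_ excludes exactly the inputs where DIGITS[n] raises IndexError in both
-- Pythons: some column's base-3 value n lies outside [-27, 27).
def Pre_pawns_to_code (pawns_dict : List (Int × List Int)) : Prop :=
  ∀ p ∈ (PySem.Dict.ofList pawns_dict).items,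
    PySem.Raise.InRange 27 (∑ i ∈ Finset.range p.2.length, p.2.getD i 0 * 3 ^ i)
instance (pawns_dict : List (Int × List Int)) : Decidable (Pre_pawns_to_code pawns_dict) := by
  unfold Pre_pawns_to_code; infer_instance
def pvWitness_pawns_to_code : (List (Int × List Int)) := [(0, [1, 2, 0]), (2, [2, 2, 2]), (-1, [])]

def Spec_pawns_to_code (pawns_dict : List (Int × List Int)) (out : String) : Prop := out = pawns_to_code_alt pawns_dict
instance (pawns_dict : List (Int × List Int)) (out : String) : Decidable (Spec_pawns_to_code pawns_dict out) := by unfold Spec_pawns_to_code; infer_instance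

-- ===== CLAIM (what is proved, stated in full; the proofs are below) =====
def Claim_equal_pawns_to_code : Prop := ∀ (pawns_dict : List (Int × List Int)), Dom_pawns_to_code pawns_dict → Pre_pawns_to_code pawns_dict → Spec_pawns_to_code pawns_dict (pawns_to_code pawns_dict)

-- ===== LEMMAS AND PROOFS =====

-- the base-3 value of a column (proof-side abbreviation)
def pvVal (ps : List Int) : Int := ∑ i ∈ Finset.range ps.length, ps.getD i 0 * 3 ^ i

-- partial value of a column from pawn positions below M
def pvLow (ps : List Int) (M : ℕ) : Int :=
  ∑ i ∈ Finset.range M, if i < ps.length then ps.getD i 0 * 3 ^ i else 0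

theorem pvLow_eq_val (ps : List Int) (M : ℕ) (h : ps.length ≤ M) : pvLow ps M = pvVal ps := by
  unfold pvLow pvVal
  rw [← Finset.sum_range_add_sum_Ico (fun i => if i < ps.length then ps.getD i 0 * 3 ^ i else 0) h]
  have hz : (∑ k ∈ Finset.Ico ps.length M,
      if k < ps.length then ps.getD k 0 * 3 ^ k else 0) = 0 :=
    Finset.sum_eq_zero (fun i hi => by
      simp [Nat.not_lt.mpr (Finset.mem_Ico.mp hi).1])
  rw [hz, add_zero]
  exact Finset.sum_congr rfl (fun i hi => if_pos (Finset.mem_range.mp hi))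

theorem pvEnum_foldl (ps : List Int) : ∀ (s : ℕ) (a : Int),
    (PySem.List.enumerate ps (s : Int)).foldl (fun n ip => n + ip.2 * (2 + 1) ^ ip.1.toNat) a
      = a + 3 ^ s * ps.foldr (fun p n => n * 3 + p) 0 := by
  induction ps with
  | nil => intro s a; simp [PySem.List.enumerate_nil]
  | cons x xs ih =>
    intro s a
    rw [PySem.List.enumerate_cons, List.foldl_cons,
        show (s : Int) + 1 = ((s + 1 : ℕ) : Int) by push_cast; ring, ih]
    simp only [Int.toNat_natCast, List.foldr_cons]
    rw [show ((2 : Int) + 1) = 3 by norm_num]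
    ring

theorem pvVal_eq_horner (ps : List Int) : pvVal ps = ps.foldr (fun p n => n * 3 + p) 0 := by
  induction ps with
  | nil => simp [pvVal]
  | cons x xs ih =>
    unfold pvVal at *
    rw [List.foldr_cons, List.length_cons, Finset.sum_range_succ']
    simp only [List.getD_cons_succ, List.getD_cons_zero, pow_succ, pow_zero]
    rw [show ∀ f : ℕ → Int, (∑ i ∈ Finset.range xs.length, f i * (3 ^ i * 3))
        = (∑ i ∈ Finset.range xs.length, f i * 3 ^ i) * 3 by
      intro f; rw [Finset.sum_mul]; congr 1; funext i; ring, ih]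
    ring

-- the per-column digit, as B computes it
def pvDigit (d : PySem.Dict Int (List Int)) (c : Int) : Char :=
  (PySem.Str.pyGet? "0123456789ABCDEFGHIJKLMNOPQ" (pvVal (d.getD c []))).getD 'X'

theorem pvGet_some (d : PySem.Dict Int (List Int)) (c : Int)
    (h : PySem.Raise.InRange 27 (pvVal (d.getD c []))) :
    PySem.Str.pyGet? "0123456789ABCDEFGHIJKLMNOPQ" (pvVal (d.getD c [])) = some (pvDigit d c) := by
  rcases ho : PySem.Str.pyGet? "0123456789ABCDEFGHIJKLMNOPQ" (pvVal (d.getD c [])) with _ | ch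
  · exfalso
    have := (PySem.List.pyGet?_eq_none_iff (xs := "0123456789ABCDEFGHIJKLMNOPQ".toList)
      (i := pvVal (d.getD c []))).mp (by simpa [PySem.Str.pyGet?] using ho)
    exact this (by simpa using h)
  · simp only [pvDigit]
    rw [ho]
    rfl

-- A's fold builds exactly the list of per-column digits
theorem pvFold_eq (d : PySem.Dict Int (List Int)) :
    ∀ (ks : List Int) (s : String),
    (∀ c ∈ ks, PySem.Raise.InRange 27 (pvVal (d.getD c []))) →
    ks.foldl (fun r c =>
      match PySem.Str.pyGet? "0123456789ABCDEFGHIJKLMNOPQ"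
          ((PySem.List.enumerate (d.getD c [])).foldl
            (fun n ip => n + ip.2 * (2 + 1) ^ ip.1.toNat) 0) with
      | some ch => r.push ch
      | none => r) s
    = String.ofList (s.toList ++ ks.map (pvDigit d)) := by
  intro ks
  induction ks with
  | nil => intro s _; simp [String.ofList_toList]
  | cons c ks ih =>
    intro s h
    have hn : (PySem.List.enumerate (d.getD c [])).foldl
        (fun n ip => n + ip.2 * (2 + 1) ^ ip.1.toNat) 0 = pvVal (d.getD c []) := by
      rw [pvVal_eq_horner]
      simpa using pvEnum_foldl (d.getD c []) 0 0
    rw [List.foldl_cons, hn, pvGet_some d c (h c (by simp)),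
        ih _ (fun c' hc' => h c' (by simp [hc']))]
    simp

theorem pvZipSelf {α β : Type} (f : α → α → β) (l : List α) :
    List.zipWith f l l = l.map (fun a => f a a) := by
  induction l <;> simp [*]

-- B's row-major sweep: invariant after M rows
theorem pvRowFold (cols : List (List Int)) : ∀ M : ℕ,
    (List.range M).foldl
      (fun (st : List Int × Int) i =>
        (List.zipWith (fun n ps => if i < ps.length then n + ps.getD i 0 * st.2 else n) st.1 cols,
         st.2 * (2 + 1)))
      (List.replicate cols.length (0 : Int), 1)
    = (cols.map (fun ps => pvLow ps M), 3 ^ M) := by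
  intro M
  induction M with
  | zero =>
    rw [show (fun ps => pvLow ps 0) = (fun _ : List Int => (0 : Int)) by
      funext ps; simp [pvLow]]
    simp [List.map_const']
  | succ M ih =>
    rw [List.range_succ, List.foldl_append, ih, List.foldl_cons, List.foldl_nil,
        Prod.mk.injEq]
    refine ⟨?_, ?_⟩
    · rw [List.zipWith_map_left, pvZipSelf]
      refine List.map_congr_left ?_
      intro ps _
      by_cases hM : M < ps.length
      · simp [pvLow, Finset.sum_range_succ, hM]
      · simp [pvLow, Finset.sum_range_succ, hM]
    · rw [show ((2 : Int) + 1) = 3 by norm_num]; ring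

-- every column length is bounded by the foldr-max
theorem pvLe_foldrMax (cols : List (List Int)) :
    ∀ ps ∈ cols, ps.length ≤ cols.foldr (fun ps m => max ps.length m) 0 := by
  induction cols with
  | nil => simp
  | cons q cols ih =>
    intro ps hps
    simp only [List.foldr_cons]
    rcases List.mem_cons.mp hps with h | h
    · rw [h]; exact le_max_left _ _
    · exact le_trans (ih ps h) (le_max_right _ _)

theorem pawns_to_code_spec : Claim_equal_pawns_to_code := by
  intro pd _ hpre
  unfold Spec_pawns_to_code pawns_to_code pawns_to_code_alt
  simp only []
  set d := PySem.Dict.ofList pd with hd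
  have hkeys : ∀ c ∈ PySem.List.sorted d.keys (fun x => x) false,
      PySem.Raise.InRange 27 (pvVal (d.getD c [])) := by
    intro c hc
    have hck : c ∈ d.keys := (PySem.List.mem_sorted _ _ _ _).mp hc
    rcases hv : d.get? c with _ | v
    · exact absurd hck ((PySem.Dict.get?_eq_none_iff_not_mem_keys _ _).mp hv)
    · have hmem : (c, v) ∈ d.items := PySem.Dict.mem_items_of_get?_eq_some _ hv
      have := hpre (c, v) (by simpa [hd] using hmem)
      rw [PySem.Dict.getD_of_get?_eq_some _ [] hv]
      exact this
  have hA := pvFold_eq d (PySem.List.sorted d.keys (fun x => x) false) "" hkeys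
  -- B side: reduce the sweep to the per-column values
  set ks := PySem.List.sorted d.keys (fun x => x) false with hks
  set cols := ks.map (fun c => d.getD c []) with hcols
  have hB := pvRowFold cols (cols.foldr (fun ps m => max ps.length m) 0)
  have hns : cols.map (fun ps => pvLow ps (cols.foldr (fun ps m => max ps.length m) 0))
      = cols.map pvVal :=
    List.map_congr_left (fun ps hps => pvLow_eq_val ps _ (pvLe_foldrMax cols ps hps))
  have hdigits :
      (cols.map (fun ps => pvLow ps (cols.foldr (fun ps m => max ps.length m) 0))).map
        (fun n => (PySem.Str.pyGet? "0123456789ABCDEFGHIJKLMNOPQ" n).getD 'X')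
      = ks.map (pvDigit d) := by
    rw [hns, hcols, List.map_map, List.map_map]
    rfl
  simp only [hA, hB, hdigits]
  simp
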